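-- pv_equiv track=rewrite | github.com/MrBrantCode/unitest_baseline | mut_generate/mist_train_cf/cf_50495/solution.py | custom_concatenate
-- ===== SOURCE A (Python) =====
-- from typing import List
--
-- def custom_concatenate(strings: List[str]) -> str:
--     result = []
--     max_len = max(len(s) for s in strings) if strings else 0
--     for i in range(max_len):
--         for s in reversed(strings):
--             if i < len(s):
--                 result.append(s[i])
--     return ''.join(result)
-- ===== SOURCE B (Python) =====
-- from typing import List
--
-- def custom_concatenate(strings: List[str]) -> str:
--     # Transpose instead of column scanning: walk each string ONCE (in reversed
--     # order) and drop its characters into per-column buckets; the answer is the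
--     # buckets joined in column order.
--     cols = []
--     for s in reversed(strings):
--         if len(s) > len(cols):
--             cols.extend([] for _ in range(len(s) - len(cols)))
--         for bucket, ch in zip(cols, s):
--             bucket.append(ch)
--     return ''.join(''.join(col) for col in cols)
-- ===== Notes on version B (the rewrite author's own statement) =====
-- stated objective: alternative
-- what changed: A is column-major (for each column index up to max_len it rescans the whole string list); B is string-major: it walks each string exactly once, dropping its characters into per-column buckets (a transpose), then joins the buckets, so no string is ever rescanned.
import Mathlib
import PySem

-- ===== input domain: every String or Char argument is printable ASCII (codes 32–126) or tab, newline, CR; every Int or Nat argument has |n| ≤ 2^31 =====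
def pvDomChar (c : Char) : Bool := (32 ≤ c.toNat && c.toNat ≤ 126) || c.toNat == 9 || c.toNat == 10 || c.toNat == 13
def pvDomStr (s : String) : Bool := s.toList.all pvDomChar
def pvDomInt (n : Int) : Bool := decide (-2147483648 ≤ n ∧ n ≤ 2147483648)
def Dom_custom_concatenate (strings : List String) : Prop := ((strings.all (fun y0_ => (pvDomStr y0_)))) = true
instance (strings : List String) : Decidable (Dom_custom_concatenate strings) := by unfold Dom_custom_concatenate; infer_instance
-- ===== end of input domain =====

-- B replaces A's column-major double scan by a transpose: each string is walked
-- once, its characters dropped into per-column buckets, and the buckets joined.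

-- ===== PORT A =====
def custom_concatenate (strings : List String) : String :=
  let max_len : Int :=
    if strings = [] then 0
    else (PySem.List.max? (strings.map (fun s => PySem.Str.len s)) (fun x => x)).getD 0
  let result : List Char :=
    (PySem.List.pyRange 0 max_len 1).foldl (fun result i =>
      strings.reverse.foldl (fun result s =>
        if i < PySem.Str.len s then result ++ [(PySem.Str.pyGet? s i).getD ' '] else result)
        result) []
  String.mk result

-- ===== PORT B =====
-- 'if len(s) > len(cols): cols.extend(...)' then 'for bucket, ch in zip(cols, s): bucket.append(ch)'
def addString (cols : List (List Char)) (s : List Char) : List (List Char) :=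
  let cols := if s.length > cols.length then cols ++ List.replicate (s.length - cols.length) [] else cols
  (List.zipWith (fun bucket ch => bucket ++ [ch]) cols s) ++ cols.drop s.length

def custom_concatenate_alt (strings : List String) : String :=
  let cols := (strings.map String.toList).reverse.foldl addString []
  String.mk cols.flatten

-- ===== PRECONDITION & SPEC =====
def Spec_custom_concatenate (strings : List String) (out : String) : Prop := out = custom_concatenate_alt strings
instance (strings : List String) (out : String) : Decidable (Spec_custom_concatenate strings out) := by unfold Spec_custom_concatenate; infer_instance

-- ===== CLAIM (what is proved, stated in full; the proofs are below) =====
def Claim_equal_custom_concatenate : Prop := ∀ (strings : List String), Dom_custom_concatenate strings → Spec_custom_concatenate strings (custom_concatenate strings)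

-- ===== LEMMAS AND PROOFS =====

-- column j of the (reversed) list of char-lists
def colAt (j : Nat) (L : List (List Char)) : List Char :=
  (L.filter (fun s => decide (j < s.length))).map (fun s => s.getD j ' ')

-- the maximum length among the char-lists
def maxLenN (L : List (List Char)) : Nat := (L.map List.length).foldr max 0

-- the per-column buckets B maintains, characterized
def colsOf (L : List (List Char)) : List (List Char) :=
  (List.range (maxLenN L)).map (fun j => colAt j L)

lemma foldr_max_le (l : List Nat) (a : Nat) (h : ∀ b ∈ l, b ≤ a) : l.foldr max 0 ≤ a := by
  induction l with
  | nil => simp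
  | cons x t ih =>
    have := h x (by simp)
    have := ih (fun b hb => h b (by simp [hb]))
    simp only [List.foldr_cons]; omega

lemma le_foldr_max (l : List Nat) (a : Nat) (h : a ∈ l) : a ≤ l.foldr max 0 := by
  induction l with
  | nil => simp at h
  | cons x t ih =>
    rcases List.mem_cons.mp h with h | h
    · subst h; simp only [List.foldr_cons]; omega
    · have := ih h; simp only [List.foldr_cons]; omega

lemma len_le_maxLenN (L : List (List Char)) (s : List Char) (hs : s ∈ L) :
    s.length ≤ maxLenN L := le_foldr_max _ _ (List.mem_map_of_mem hs)

lemma colAt_eq_nil (L : List (List Char)) (j : Nat) (hj : maxLenN L ≤ j) :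
    colAt j L = [] := by
  unfold colAt
  rw [List.filter_eq_nil_iff.mpr, List.map_nil]
  intro s hs
  have := len_le_maxLenN L s hs
  simp only [decide_eq_true_eq, Nat.not_lt]
  omega

lemma getD_colsOf (L : List (List Char)) (j : Nat) :
    (colsOf L).getD j [] = colAt j L := by
  unfold colsOf
  by_cases hj : j < maxLenN L
  · rw [List.getD_eq_getElem _ _ (by simpa using hj)]
    simp
  · rw [List.getD_eq_default _ _ (by simpa using hj), colAt_eq_nil _ _ (by omega)]

lemma maxLenN_append_singleton (L : List (List Char)) (s : List Char) :
    maxLenN (L ++ [s]) = max (maxLenN L) s.length := by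
  unfold maxLenN
  rw [List.map_append, List.foldr_append]
  induction (L.map List.length) with
  | nil => simp
  | cons x t ih => simp only [List.foldr_cons, ih]; omega

lemma colAt_append_singleton (L : List (List Char)) (s : List Char) (j : Nat) :
    colAt j (L ++ [s]) = colAt j L ++ (if j < s.length then [s.getD j ' '] else []) := by
  unfold colAt
  rw [List.filter_append, List.map_append]
  by_cases hj : j < s.length <;> simp [hj]

lemma addString_colsOf (L : List (List Char)) (s : List Char) :
    addString (colsOf L) s = colsOf (L ++ [s]) := by
  have hlen : (colsOf L).length = maxLenN L := by simp [colsOf]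
  unfold addString
  set cols' : List (List Char) :=
    if s.length > (colsOf L).length then colsOf L ++ List.replicate (s.length - (colsOf L).length) []
    else colsOf L with hcols'
  have hclen : cols'.length = max (maxLenN L) s.length := by
    rw [hcols']; split <;> simp [hlen] <;> omega
  have hsle : s.length ≤ cols'.length := by omega
  have hget : ∀ (j : Nat) (hj : j < cols'.length), cols'[j] = colAt j L := by
    intro j hj
    rw [List.getElem_eq_iff hj]
    rw [hcols'] at hj ⊢
    by_cases hbig : s.length > (colsOf L).length
    · rw [if_pos hbig] at hj ⊢
      by_cases hjl : j < (colsOf L).length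
      · rw [List.getElem?_append_left hjl, List.getElem?_eq_getElem hjl,
          ← List.getD_eq_getElem _ _ hjl, getD_colsOf]
      · rw [List.getElem?_append_right (by omega), List.getElem?_replicate,
          if_pos (by simp at hj; omega), colAt_eq_nil _ _ (by rw [hlen] at hjl; omega)]
    · rw [if_neg hbig] at hj ⊢
      rw [List.getElem?_eq_getElem hj, ← List.getD_eq_getElem _ _ hj, getD_colsOf]
  apply List.ext_getElem
  · simp [hclen, maxLenN_append_singleton, colsOf]
  · intro j hj1 hj2
    have hjmax : j < max (maxLenN L) s.length := by
      simpa [hclen, hsle, Nat.min_eq_left] using hj1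
    have hcolsOf : (colsOf (L ++ [s]))[j] = colAt j (L ++ [s]) := by
      simp [colsOf]
    rw [hcolsOf, colAt_append_singleton]
    have hzl : (List.zipWith (fun bucket ch => bucket ++ [ch]) cols' s).length = s.length := by
      rw [List.length_zipWith]
      omega
    by_cases hjs : j < s.length
    · rw [List.getElem_append_left (by omega), List.getElem_zipWith, if_pos hjs,
        hget j (by omega), List.getD_eq_getElem _ _ hjs]
    · rw [List.getElem_append_right (by omega)]
      simp only [List.getElem_drop]
      have hidx : s.length + (j - (List.zipWith (fun bucket ch => bucket ++ [ch]) cols' s).length) = j := by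
        rw [hzl]; omega
      rw [if_neg hjs, List.append_nil]
      simp only [hidx]
      exact hget j (by omega)

lemma foldl_addString (L : List (List Char)) :
    L.foldl addString [] = colsOf L := by
  induction L using List.reverseRecOn with
  | nil => simp [colsOf, maxLenN]
  | append_singleton L s ih =>
    rw [List.foldl_append, List.foldl_cons, List.foldl_nil, ih, addString_colsOf]

lemma flatten_colsOf (L : List (List Char)) :
    (colsOf L).flatten = (List.range (maxLenN L)).flatMap (fun j => colAt j L) := by
  simp [colsOf, List.flatMap_def]

-- ===== VERDICT (by name: the statement is the Claim_ definition above) =====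
theorem custom_concatenate_spec : Claim_equal_custom_concatenate := by
  intro strings _
  unfold Spec_custom_concatenate
  by_cases hstr : strings = []
  · subst hstr
    simp [custom_concatenate, custom_concatenate_alt]
  · obtain ⟨m, hm⟩ : ∃ m, PySem.List.max? (strings.map (fun s => PySem.Str.len s)) (fun x => x) = some m := by
      cases h : PySem.List.max? (strings.map (fun s => PySem.Str.len s)) (fun x => x) with
      | none =>
        exact absurd ((PySem.List.max?_eq_none_iff _ _).mp h) (by simpa using hstr)
      | some m => exact ⟨m, rfl⟩
    have hmax := PySem.List.max?_isMax hm
    obtain ⟨t0, ht0, hlen0⟩ := List.mem_map.mp (PySem.List.max?_mem hm)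
    have hm0 : 0 ≤ m := by
      rw [← hlen0, PySem.Str.len_eq]
      exact Int.natCast_nonneg _
    have hmN : m = ((m.toNat : Nat) : Int) := (Int.toNat_of_nonneg hm0).symm
    have hub : ∀ s ∈ strings, s.toList.length ≤ m.toNat := by
      intro s hs
      have h1 := hmax (PySem.Str.len s) (List.mem_map_of_mem hs)
      rw [PySem.Str.len_eq] at h1
      omega
    set R : List (List Char) := (strings.map String.toList).reverse with hR
    -- m.toNat is exactly maxLenN R
    have hmlen : maxLenN R = m.toNat := by
      apply Nat.le_antisymm
      · apply foldr_max_le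
        intro b hb
        obtain ⟨t, ht, rfl⟩ := List.mem_map.mp hb
        rw [hR, ← List.map_reverse] at ht
        obtain ⟨u, hu, rfl⟩ := List.mem_map.mp ht
        exact hub u (List.mem_reverse.mp hu)
      · apply le_foldr_max
        have : t0.toList ∈ R := by
          rw [hR, ← List.map_reverse]
          exact List.mem_map_of_mem (List.mem_reverse.mpr ht0)
        have hl0 : t0.toList.length = m.toNat := by
          rw [PySem.Str.len_eq] at hlen0; omega
        rw [← hl0]
        exact List.mem_map_of_mem this
    -- characterize A's inner loop as filter+map over one column
    have hA : ∀ (i : Int) (acc : List Char),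
        strings.reverse.foldl (fun result s =>
          if i < PySem.Str.len s then result ++ [(PySem.Str.pyGet? s i).getD ' '] else result) acc
        = acc ++ (strings.reverse.filter (fun s => decide (i < PySem.Str.len s))).map
            (fun s => (PySem.Str.pyGet? s i).getD ' ') := by
      intro i acc
      rw [← PySem.List.foldl_append_if (fun s => decide (i < PySem.Str.len s))
            (fun s => (PySem.Str.pyGet? s i).getD ' ')]
      refine congrArg (fun F => List.foldl F acc strings.reverse) ?_
      funext result s
      simp
    -- one column of A is colAt over the reversed char lists
    have hcol : ∀ k : Nat,
        (strings.reverse.filter (fun s => decide (((0:Int) + (k : Int)) < PySem.Str.len s))).map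
            (fun s => (PySem.Str.pyGet? s ((0:Int) + (k : Int))).getD ' ')
          = colAt k R := by
      intro k
      rw [hR, ← List.map_reverse]
      unfold colAt
      rw [List.filter_map, List.map_map]
      have hp : (fun s => decide (((0:Int) + (k : Int)) < PySem.Str.len s))
          = ((fun s => decide (k < s.length)) ∘ String.toList) := by
        funext s
        simp [PySem.Str.len_eq]
      rw [hp]
      refine congrArg (fun f => List.map f _) ?_
      funext s
      have : ((0:Int) + (k : Int)) = ((k : Nat) : Int) := by omega
      simp [this, Function.comp, List.getD_eq_getElem?_getD]
    -- assemble
    show custom_concatenate strings = custom_concatenate_alt strings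
    simp only [custom_concatenate, custom_concatenate_alt, if_neg hstr, hm, Option.getD_some]
    rw [← hR, foldl_addString, flatten_colsOf, hmlen]
    refine congrArg String.mk ?_
    have houter : (fun (result : List Char) (i : Int) =>
          strings.reverse.foldl (fun result s =>
            if i < PySem.Str.len s then result ++ [(PySem.Str.pyGet? s i).getD ' '] else result) result)
        = fun result i => result ++ (strings.reverse.filter (fun s => decide (i < PySem.Str.len s))).map
            (fun s => (PySem.Str.pyGet? s i).getD ' ') := by
      funext result i
      exact hA i result
    rw [houter, PySem.List.foldl_append_eq_flatMap, List.nil_append]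
    rw [hmN, PySem.List.pyRange_one, List.flatMap_map]
    simp only [Int.sub_zero, Int.toNat_natCast]
    refine congrArg (fun f => List.flatMap f (List.range m.toNat)) ?_
    funext k
    exact hcol k
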